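-- pv_equiv track=rewrite | github.com/davidshaw1234/redditsentimentscraper | text_parser.py | symbol_remover
-- ===== SOURCE A (Python) =====
-- def symbol_remover(strinput,removeDollar):
--     if removeDollar:
--         chars = "!@#%^&*()-_=+[]}{\|;:<>,./?1234567890$"
--         for c in chars:
--             if c in strinput:
--                 strinput = strinput.replace(c,' ')
--         return strinput.replace('"',' ').replace("'"," ")
--     else:
--         chars = "!@#%^&*()-_=+[]}{\|;:<>,./?1234567890"
--         for c in chars:
--             if c in strinput:
--                 strinput = strinput.replace(c,' ')
--         return strinput.replace('"',' ').replace("'"," ")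
-- ===== SOURCE B (Python) =====
-- def symbol_remover(strinput, removeDollar):
--     base = "!@#%^&*()-_=+[]}{\\|;:<>,./?1234567890\"'"
--     syms = set(base + "$") if removeDollar else set(base)
--     return ''.join(' ' if ch in syms else ch for ch in strinput)
-- ===== Notes on version B (the rewrite author's own statement) =====
-- stated objective: idiomatic
-- what changed: Replaced ~40 sequential full-string .replace scans with a single pass over the input using one precomputed set of the characters to blank out.
import Mathlib
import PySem

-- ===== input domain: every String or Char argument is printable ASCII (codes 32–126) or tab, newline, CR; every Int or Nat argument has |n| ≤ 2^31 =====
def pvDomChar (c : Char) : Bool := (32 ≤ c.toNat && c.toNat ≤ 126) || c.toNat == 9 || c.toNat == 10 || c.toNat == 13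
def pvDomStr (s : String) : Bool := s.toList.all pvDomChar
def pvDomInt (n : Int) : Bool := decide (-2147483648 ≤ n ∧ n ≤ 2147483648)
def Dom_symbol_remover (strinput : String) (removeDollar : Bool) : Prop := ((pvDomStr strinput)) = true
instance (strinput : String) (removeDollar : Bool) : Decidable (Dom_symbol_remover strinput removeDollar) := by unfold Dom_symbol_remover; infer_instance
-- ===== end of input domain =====

-- B replaces A's ~40 sequential full-string replace passes with one precomputed
-- character set and a single pass over the input (idiomatic; return value only).

-- ===== PORT A =====
-- the loop body: if c in strinput: strinput = strinput.replace(c, ' ')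
def pvStepA (s : List Char) (c : Char) : List Char :=
  if PySem.Chars.isIn [c] s then PySem.Chars.replace s [c] [' '] else s

def symbol_remover (strinput : String) (removeDollar : Bool) : String :=
  if removeDollar then
    let chars := "!@#%^&*()-_=+[]}{\\|;:<>,./?1234567890$".toList
    let s := chars.foldl pvStepA strinput.toList
    String.mk (PySem.Chars.replace (PySem.Chars.replace s ['"'] [' ']) ['\''] [' '])
  else
    let chars := "!@#%^&*()-_=+[]}{\\|;:<>,./?1234567890".toList
    let s := chars.foldl pvStepA strinput.toList
    String.mk (PySem.Chars.replace (PySem.Chars.replace s ['"'] [' ']) ['\''] [' '])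

-- ===== PORT B =====
def symbol_remover_alt (strinput : String) (removeDollar : Bool) : String :=
  let base := "!@#%^&*()-_=+[]}{\\|;:<>,./?1234567890\"'".toList
  let syms : PySem.Set Char :=
    if removeDollar then PySem.Set.ofList (base ++ ['$']) else PySem.Set.ofList base
  String.mk (strinput.toList.map (fun ch => if ch ∈ syms then ' ' else ch))

-- ===== PRECONDITION & SPEC =====
def Spec_symbol_remover (strinput : String) (removeDollar : Bool) (out : String) : Prop := out = symbol_remover_alt strinput removeDollar
instance (strinput : String) (removeDollar : Bool) (out : String) : Decidable (Spec_symbol_remover strinput removeDollar out) := by unfold Spec_symbol_remover; infer_instance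

-- ===== CLAIM (what is proved, stated in full; the proofs are below) =====
def Claim_equal_symbol_remover : Prop := ∀ (strinput : String) (removeDollar : Bool), Dom_symbol_remover strinput removeDollar → Spec_symbol_remover strinput removeDollar (symbol_remover strinput removeDollar)

-- ===== LEMMAS AND PROOFS =====

-- replace of a single-character pattern is a pointwise map
theorem pv_go_single (c : Char) : ∀ (fuel : Nat) (l acc : List Char), l.length ≤ fuel →
    PySem.Chars.replace.go [c] [' '] fuel l acc
      = acc.reverse ++ l.map (fun x => if x = c then ' ' else x) := by
  intro fuel
  induction fuel with
  | zero =>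
    intro l acc h
    have : l = [] := List.eq_nil_of_length_eq_zero (Nat.le_zero.mp h)
    subst this
    simp [PySem.Chars.replace.go]
  | succ n ih =>
    intro l acc h
    cases l with
    | nil => simp [PySem.Chars.replace.go]
    | cons x t =>
      by_cases hx : x = c
      · subst hx
        have hpre : [x].isPrefixOf (x :: t) = true := by
          simp [List.isPrefixOf]
        rw [PySem.Chars.replace.go]
        simp only [hpre, if_true, List.length_singleton, List.drop_succ_cons, List.drop_zero]
        rw [ih t _ (by simpa using Nat.succ_le_succ_iff.mp h)]
        simp
      · have hpre : [c].isPrefixOf (x :: t) = false := by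
          simp [List.isPrefixOf]; exact fun hxc => hx hxc.symm
        rw [PySem.Chars.replace.go]
        simp only [hpre, Bool.false_eq_true, if_false]
        rw [ih t _ (by simpa using Nat.succ_le_succ_iff.mp h)]
        simp [hx]

theorem pv_replace_single (c : Char) (s : List Char) :
    PySem.Chars.replace s [c] [' '] = s.map (fun x => if x = c then ' ' else x) := by
  rw [PySem.Chars.replace]
  simp only [List.isEmpty_cons, Bool.false_eq_true, if_false]
  simpa using pv_go_single c s.length s [] le_rfl

theorem pv_stepA_eq (s : List Char) (c : Char) :
    pvStepA s c = s.map (fun x => if x = c then ' ' else x) := by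
  unfold pvStepA
  by_cases h : PySem.Chars.isIn [c] s = true
  · rw [if_pos h, pv_replace_single]
  · rw [if_neg h]
    have hc : c ∉ s := by
      intro hc
      exact h ((PySem.Chars.isIn_iff_infix _ _).mpr ((List.singleton_infix_iff _ _).mpr hc))
    conv_lhs => rw [← List.map_id s]
    refine List.map_congr_left ?_
    intro x hx
    simp only [id]
    rw [if_neg]
    intro hxc; exact hc (hxc ▸ hx)

-- folding single-char blanking over an alphabet L (with ' ' ∉ L) is one map by membership in L
theorem pv_foldA_eq (L : List Char) (hsp : ' ' ∉ L) : ∀ (s : List Char),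
    L.foldl pvStepA s = s.map (fun x => if x ∈ L then ' ' else x) := by
  induction L with
  | nil => intro s; simp
  | cons c L' ih =>
    intro s
    have hsp' : ' ' ∉ L' := fun h => hsp (List.mem_cons_of_mem _ h)
    have hspc : (' ' : Char) ≠ c := fun h => hsp (h ▸ List.mem_cons_self ..)
    simp only [List.foldl_cons, pv_stepA_eq, ih hsp', List.map_map]
    refine List.map_congr_left ?_
    intro x _
    simp only [Function.comp, List.mem_cons]
    by_cases hxc : x = c
    · simp [hxc]
    · simp [hxc]

-- membership in B's set equals membership in A's full processed alphabet
theorem pv_mem_dollar (x : Char) :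
    (x ∈ PySem.Set.ofList ("!@#%^&*()-_=+[]}{\\|;:<>,./?1234567890\"'".toList ++ ['$']))
      ↔ x ∈ ("!@#%^&*()-_=+[]}{\\|;:<>,./?1234567890$".toList ++ ['"', '\'']) := by
  rw [PySem.Set.mem_ofList]
  exact List.Perm.mem_iff (by decide)

theorem pv_mem_nodollar (x : Char) :
    (x ∈ PySem.Set.ofList "!@#%^&*()-_=+[]}{\\|;:<>,./?1234567890\"'".toList)
      ↔ x ∈ ("!@#%^&*()-_=+[]}{\\|;:<>,./?1234567890".toList ++ ['"', '\'']) := by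
  rw [PySem.Set.mem_ofList]
  exact List.Perm.mem_iff (by decide)

-- A's whole pipeline on one branch: fold over L then blank '"' and '\''
theorem pv_pipeline (L : List Char) (hsp : ' ' ∉ L) (s : List Char) :
    PySem.Chars.replace (PySem.Chars.replace (L.foldl pvStepA s) ['"'] [' ']) ['\''] [' ']
      = s.map (fun x => if x ∈ L ++ ['"', '\''] then ' ' else x) := by
  rw [pv_foldA_eq L hsp, pv_replace_single, pv_replace_single]
  simp only [List.map_map]
  refine List.map_congr_left ?_
  intro x _
  have hspq : (' ' : Char) ≠ '"' := by decide
  have hspq' : (' ' : Char) ≠ '\'' := by decide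
  simp only [Function.comp, List.mem_append, List.mem_cons, List.not_mem_nil, or_false]
  by_cases h1 : x ∈ L
  · simp [h1, hspq, hspq']
  · by_cases h2 : x = '"'
    · simp_all
    · by_cases h3 : x = '\''
      · simp_all
      · simp_all

-- ===== VERDICT (by name: the statement is the Claim_ definition above) =====
set_option maxRecDepth 8192 in
theorem symbol_remover_spec : Claim_equal_symbol_remover := by
  intro strinput removeDollar _
  unfold Spec_symbol_remover symbol_remover symbol_remover_alt
  cases removeDollar with
  | true =>
    simp only [if_true]
    rw [pv_pipeline _ (by decide)]
    exact congrArg String.mk (List.map_congr_left fun x _ => by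
      simp only [propext (pv_mem_dollar x)])
  | false =>
    simp only [Bool.false_eq_true, if_false]
    rw [pv_pipeline _ (by decide)]
    exact congrArg String.mk (List.map_congr_left fun x _ => by
      simp only [propext (pv_mem_nodollar x)])
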